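-- pv_equiv track=rewrite | github.com/JoaoAntonio08/The-Collector-Binarie | v.1.5/ui/binary_interpreter_fixed.py | _normalize_binary
-- ===== SOURCE A (Python) =====
-- def _normalize_binary(binary_code):
--     """
--     Normaliza o código binário removendo espaços, comentários e caracteres inválidos.
--
--     Args:
--         binary_code: Código binário a ser normalizado
--
--     Returns:
--         Código binário normalizado
--     """
--     # Remove comentários (tudo após //)
--     lines = binary_code.split('\n')
--     cleaned_lines = []
--     for line in lines:
--         comment_pos = line.find('//')
--         if comment_pos >= 0:
--             line = line[:comment_pos]
--         cleaned_lines.append(line)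
--
--     binary_code = '\n'.join(cleaned_lines)
--
--     # Remove espaços e outros caracteres não binários
--     normalized = []
--     for char in binary_code:
--         if char in '01\n':
--             normalized.append(char)
--         elif char.isspace():
--             # Preserva quebras de linha, converte outros espaços para espaço único
--             if char != '\n':
--                 normalized.append(' ')
--
--     return ''.join(normalized)
-- ===== SOURCE B (Python) =====
-- def _normalize_binary(binary_code):
--     # Single-pass state-machine scanner: one index loop over the raw string with
--     # an in_comment flag, detecting '//' by lookahead; no split/join, no second pass.
--     out = []
--     in_comment = False
--     i = 0
--     n = len(binary_code)
--     while i < n: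
--         c = binary_code[i]
--         if c == '\n':
--             out.append('\n')
--             in_comment = False
--             i += 1
--         elif in_comment:
--             i += 1
--         elif c == '/' and i + 1 < n and binary_code[i + 1] == '/':
--             in_comment = True
--             i += 2
--         elif c == '0' or c == '1':
--             out.append(c)
--             i += 1
--         elif c.isspace():
--             out.append(' ')
--             i += 1
--         else:
--             i += 1
--     return ''.join(out)
-- ===== Notes on version B (the rewrite author's own statement) =====
-- stated objective: alternative
-- what changed: B replaces A's staged pipeline (split into lines, cut each at the first comment marker, join, then a second global character filter) with a single-pass state-machine scanner: one index loop over the raw string with an in_comment flag that detects a comment opener (two consecutive slashes) by lookahead and is reset at each newline, emitting cleaned characters as it goes.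
import Mathlib
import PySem

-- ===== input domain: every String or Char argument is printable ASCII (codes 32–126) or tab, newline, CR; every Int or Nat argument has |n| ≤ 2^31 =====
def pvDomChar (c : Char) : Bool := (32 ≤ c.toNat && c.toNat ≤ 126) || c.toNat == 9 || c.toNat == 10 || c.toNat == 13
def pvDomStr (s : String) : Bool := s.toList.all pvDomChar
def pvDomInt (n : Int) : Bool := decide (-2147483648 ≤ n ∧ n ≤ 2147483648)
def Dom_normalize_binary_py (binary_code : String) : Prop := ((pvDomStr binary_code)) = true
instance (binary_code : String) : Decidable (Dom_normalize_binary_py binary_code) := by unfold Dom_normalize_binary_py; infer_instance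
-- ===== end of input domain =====

-- B replaces A's staged pipeline (split lines / cut comments / join / second global filter)
-- by a single-pass state-machine scanner with an in_comment flag; objective: alternative, same O(n).

-- ===== PORT A =====
-- literal transliteration of A: split into lines, cut each line at find('//'),
-- join with '\n', then one character scan keeping '0'/'1'/'\n' and mapping other
-- whitespace to ' '.
def normalize_binary_py (binary_code : String) : String :=
  let lines := PySem.Chars.splitOn binary_code.toList ['\n']
  let cleaned_lines := lines.foldl (fun acc line =>
    let comment_pos := PySem.Chars.find line ['/', '/']
    let line := if 0 ≤ comment_pos then PySem.Chars.slice line none (some comment_pos) else line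
    acc ++ [line]) []
  let joined := PySem.Chars.join ['\n'] cleaned_lines
  let normalized := joined.foldl (fun acc c =>
    if c = '0' ∨ c = '1' ∨ c = '\n' then acc ++ [c]
    else if PySem.Chars.isspace c then (if c ≠ '\n' then acc ++ [' '] else acc)
    else acc) []
  String.mk normalized

-- ===== PORT B =====
-- Source B's while-loop scanner, transliterated as recursion over the remaining
-- characters (the index i becomes the suffix; 'i+1 < n and s[i+1]' is head? of
-- the suffix; 'in_comment' is the Bool state). Branches in Source B's order.
def pvScan : Bool → List Char → List Char
  | _, [] => []
  | inC, c :: rest =>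
    if c = '\n' then '\n' :: pvScan false rest
    else if inC then pvScan true rest
    else if c = '/' ∧ rest.head? = some '/' then pvScan true rest.tail
    else if c = '0' ∨ c = '1' then c :: pvScan false rest
    else if PySem.Chars.isspace c then ' ' :: pvScan false rest
    else pvScan false rest
termination_by _ l => l.length
decreasing_by
  all_goals simp [List.length_tail]
  all_goals omega

def normalize_binary_py_alt (binary_code : String) : String :=
  String.mk (pvScan false binary_code.toList)

-- ===== PRECONDITION & SPEC =====
def Spec_normalize_binary_py (binary_code : String) (out : String) : Prop := out = normalize_binary_py_alt binary_code
instance (binary_code : String) (out : String) : Decidable (Spec_normalize_binary_py binary_code out) := by unfold Spec_normalize_binary_py; infer_instance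

-- ===== CLAIM (what is proved, stated in full; the proofs are below) =====
def Claim_equal_normalize_binary_py : Prop := ∀ (binary_code : String), Dom_normalize_binary_py binary_code → Spec_normalize_binary_py binary_code (normalize_binary_py binary_code)

-- ===== LEMMAS AND PROOFS =====

-- cut a line at the first '//' (reference form used by the proofs)
def pvCut : List Char → List Char
  | [] => []
  | c :: rest => if (['/', '/'] : List Char).isPrefixOf (c :: rest) then [] else c :: pvCut rest

-- per-character cleaning of a comment-free, newline-free line
def pvKeep (c : Char) : Option Char :=
  if c = '0' ∨ c = '1' ∨ PySem.Chars.isspace c then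
    some (if c = '0' ∨ c = '1' then c else ' ')
  else none

def pvClean (l : List Char) : List Char := (pvCut l).filterMap pvKeep

-- the per-character action of A's second loop, as an Option-valued function
def pvFA (c : Char) : Option Char :=
  if c = '0' ∨ c = '1' ∨ c = '\n' then some c
  else if PySem.Chars.isspace c then (if c ≠ '\n' then some ' ' else none)
  else none

theorem pvFoldlSnocMap {α β : Type} (f : α → β) (l : List α) (acc : List β) :
    l.foldl (fun acc x => acc ++ [f x]) acc = acc ++ l.map f := by
  induction l generalizing acc with
  | nil => simp
  | cons x l ih => simp [ih]

theorem pvCleanAFoldl (l : List Char) (acc : List Char) :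
    l.foldl (fun acc c =>
      if c = '0' ∨ c = '1' ∨ c = '\n' then acc ++ [c]
      else if PySem.Chars.isspace c then (if c ≠ '\n' then acc ++ [' '] else acc)
      else acc) acc = acc ++ l.filterMap pvFA := by
  induction l generalizing acc with
  | nil => simp
  | cons c l ih =>
    simp only [List.foldl_cons, List.filterMap_cons, ih]
    by_cases h1 : c = '0' ∨ c = '1' ∨ c = '\n'
    · simp [pvFA, h1]
    · have h0 : ¬ (c = '0' ∨ c = '1') := fun hh => h1 (by tauto)
      by_cases h2 : PySem.Chars.isspace c
      · by_cases h3 : c = '\n'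
        · simp [pvFA, h0, h1, h2, h3]
        · simp [pvFA, h0, h1, h2, h3]
      · simp [pvFA, h0, h1, h2]

theorem pvFAJoin (ps : List (List Char)) :
    (PySem.Chars.join ['\n'] ps).filterMap pvFA
      = PySem.Chars.join ['\n'] (ps.map (List.filterMap pvFA)) := by
  induction ps with
  | nil => simp [PySem.Chars.join_nil]
  | cons p rest ih =>
    cases rest with
    | nil => simp [PySem.Chars.join_singleton]
    | cons q rest' =>
      rw [PySem.Chars.join_cons_cons, List.map_cons, List.map_cons,
        PySem.Chars.join_cons_cons, List.filterMap_append, List.filterMap_append, ← List.map_cons]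
      rw [ih]
      have h : List.filterMap pvFA ['\n'] = ['\n'] := by decide
      rw [h]

theorem pvSplitOnGoNoNl (fuel : Nat) : ∀ (l cur : List Char) (acc : List (List Char)),
    l.length < fuel → '\n' ∉ cur → (∀ p ∈ acc, '\n' ∉ p) →
    ∀ p ∈ PySem.Chars.splitOn.go ['\n'] fuel l cur acc, '\n' ∉ p := by
  induction fuel with
  | zero => intro l cur acc h; omega
  | succ n ih =>
    intro l cur acc hlen hcur hacc p hp
    cases l with
    | nil =>
      simp only [PySem.Chars.splitOn.go] at hp
      simp only [List.mem_reverse, List.mem_cons] at hp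
      rcases hp with h | h
      · subst h; simp [hcur]
      · exact hacc p h
    | cons c rest =>
      by_cases hc : c = '\n'
      · subst hc
        simp only [PySem.Chars.splitOn.go, List.isPrefixOf, BEq.rfl, Bool.true_and,
          List.isPrefixOf_nil_left, if_true, List.length_cons, List.drop_succ_cons,
          List.drop_zero] at hp
        exact ih rest [] (cur.reverse :: acc) (by simpa using hlen) (by simp)
          (by intro q hq; rcases List.mem_cons.mp hq with h | h
              · subst h; simp [hcur]
              · exact hacc q h) p hp
      · have hnotp : (['\n'] : List Char).isPrefixOf (c :: rest) = false := by
          simp [List.isPrefixOf]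
          exact fun h => absurd h.symm hc
        simp only [PySem.Chars.splitOn.go, hnotp, if_false, Bool.false_eq_true] at hp
        exact ih rest (c :: cur) acc (by simpa using hlen)
          (by intro h; rcases List.mem_cons.mp h with h | h
              · exact hc h.symm
              · exact hcur h) hacc p hp

theorem pvMemSplitOnNoNl (cs : List Char) :
    ∀ p ∈ PySem.Chars.splitOn cs ['\n'], '\n' ∉ p := by
  unfold PySem.Chars.splitOn
  exact pvSplitOnGoNoNl (cs.length + 1) cs [] [] (by omega) (by simp) (by simp)

theorem pvCutSubset : ∀ (l : List Char) (c : Char), c ∈ pvCut l → c ∈ l := by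
  intro l
  induction l with
  | nil => simp [pvCut]
  | cons d rest ih =>
    intro c hc
    rw [pvCut] at hc
    split at hc
    · simp at hc
    · rcases List.mem_cons.mp hc with h | h
      · simp [h]
      · exact List.mem_cons_of_mem _ (ih c h)

theorem pvCutId : ∀ l : List Char, ¬ (['/', '/'] : List Char) <:+: l → pvCut l = l := by
  intro l
  induction l with
  | nil => intro _; rfl
  | cons c rest ih =>
    intro h
    rw [pvCut]
    rw [if_neg]
    · rw [ih (fun hi => h (List.infix_cons hi))]
    · intro hp
      exact h ((List.isPrefixOf_iff_prefix.mp hp).isInfix)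

theorem pvCutTake : ∀ (l : List Char) (k : Nat),
    (['/', '/'] : List Char) <+: l.drop k →
    (∀ i < k, ¬ (['/', '/'] : List Char) <+: l.drop i) →
    pvCut l = l.take k := by
  intro l
  induction l with
  | nil =>
    intro k h _
    simp at h
  | cons c rest ih =>
    intro k h hmin
    cases k with
    | zero =>
      simp only [List.drop_zero] at h
      rw [pvCut, if_pos (List.isPrefixOf_iff_prefix.mpr h)]
      simp
    | succ k =>
      have h0 : ¬ (['/', '/'] : List Char) <+: (c :: rest) := by
        have := hmin 0 (by omega)
        simpa using this
      rw [pvCut, if_neg (fun hp => h0 (List.isPrefixOf_iff_prefix.mp hp))]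
      rw [List.take_succ_cons]
      congr 1
      exact ih k (by simpa using h)
        (fun i hi => by
          have := hmin (i + 1) (by omega)
          simpa using this)

theorem pvCutEq (l : List Char) :
    (if 0 ≤ PySem.Chars.find l ['/', '/'] then
      PySem.Chars.slice l none (some (PySem.Chars.find l ['/', '/'])) else l) = pvCut l := by
  by_cases h : 0 ≤ PySem.Chars.find l ['/', '/']
  · obtain ⟨h1, h2⟩ := PySem.Chars.find_spec h
    rw [if_pos h, PySem.Chars.slice_eq_listSlice, PySem.List.slice_to l h]
    exact (pvCutTake l (PySem.Chars.find l ['/', '/']).toNat h1 h2).symm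
  · have hne : PySem.Chars.find l ['/', '/'] = -1 := by
      have := PySem.Chars.neg_one_le_find l ['/', '/']
      omega
    rw [if_neg h]
    exact (pvCutId l ((PySem.Chars.find_eq_neg_one_iff l ['/', '/']).mp hne)).symm

theorem pvFAeqKeep (c : Char) (h : c ≠ '\n') : pvFA c = pvKeep c := by
  by_cases h1 : c = '0' ∨ c = '1'
  · rcases h1 with h1 | h1 <;> simp [pvFA, pvKeep, h1]
  · have h1' : ¬ (c = '0' ∨ c = '1' ∨ c = '\n') := by tauto
    by_cases h2 : PySem.Chars.isspace c
    · simp [pvFA, pvKeep, h1, h1', h2, h]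
    · have h2' : ¬ (c = '0' ∨ c = '1' ∨ PySem.Chars.isspace c) := by tauto
      obtain ⟨ha, hb⟩ := not_or.mp h1
      simp [pvFA, pvKeep, h1', h2, h2', ha, hb, h]

-- A in terms of pvClean on the split parts
theorem pvAEq (s : String) :
    normalize_binary_py s
      = String.mk (PySem.Chars.join ['\n']
          ((PySem.Chars.splitOn s.toList ['\n']).map pvClean)) := by
  simp only [normalize_binary_py]
  rw [pvFoldlSnocMap (f := fun line =>
        if 0 ≤ PySem.Chars.find line ['/', '/'] then
          PySem.Chars.slice line none (some (PySem.Chars.find line ['/', '/'])) else line),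
      List.nil_append, pvCleanAFoldl, List.nil_append, pvFAJoin, List.map_map]
  congr 1
  congr 1
  apply List.map_congr_left
  intro l hl
  have hnl := pvMemSplitOnNoNl s.toList l hl
  simp only [Function.comp_apply, pvClean]
  rw [pvCutEq l]
  exact List.filterMap_congr (fun c hc => pvFAeqKeep c (fun he => hnl (he ▸ pvCutSubset l c hc)))

-- join of two consecutive parts can be fused with the separator in between
theorem pvJoinConsNe (sep x : List Char) (ys : List (List Char)) (h : ys ≠ []) :
    PySem.Chars.join sep (x :: ys) = x ++ sep ++ PySem.Chars.join sep ys := by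
  cases ys with
  | nil => exact absurd rfl h
  | cons y ys' => rw [PySem.Chars.join_cons_cons]

theorem pvJoinTwo (sep a b : List Char) (xs : List (List Char)) :
    PySem.Chars.join sep (xs ++ [a, b]) = PySem.Chars.join sep (xs ++ [a ++ sep ++ b]) := by
  induction xs with
  | nil =>
    simp only [List.nil_append]
    rw [pvJoinConsNe sep a [b] (by simp), PySem.Chars.join_singleton,
      PySem.Chars.join_singleton]
  | cons x xs ih =>
    simp only [List.cons_append]
    rw [pvJoinConsNe sep x (xs ++ [a, b]) (by simp),
      pvJoinConsNe sep x (xs ++ [a ++ sep ++ b]) (by simp), ih]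

-- splitOn.go reconstructs: joining the result with '\n' gives back acc, cur and l
theorem pvGoJoin (fuel : Nat) : ∀ (l cur : List Char) (acc : List (List Char)),
    l.length < fuel →
    PySem.Chars.join ['\n'] (PySem.Chars.splitOn.go ['\n'] fuel l cur acc)
      = PySem.Chars.join ['\n'] (acc.reverse ++ [cur.reverse ++ l]) := by
  induction fuel with
  | zero => intro l cur acc h; omega
  | succ n ih =>
    intro l cur acc hlen
    cases l with
    | nil =>
      simp only [PySem.Chars.splitOn.go, List.reverse_cons, List.append_nil]
    | cons c rest =>
      by_cases hc : c = '\n'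
      · subst hc
        simp only [PySem.Chars.splitOn.go, List.isPrefixOf, BEq.rfl, Bool.true_and,
          List.isPrefixOf_nil_left, if_true, List.length_cons, List.drop_succ_cons,
          List.drop_zero, List.length_nil]
        rw [ih rest [] (cur.reverse :: acc) (by simpa using hlen)]
        simpa using pvJoinTwo ['\n'] cur.reverse rest acc.reverse
      · have hnotp : (['\n'] : List Char).isPrefixOf (c :: rest) = false := by
          simp [List.isPrefixOf]
          exact fun h => absurd h.symm hc
        simp only [PySem.Chars.splitOn.go, hnotp, if_false, Bool.false_eq_true]
        rw [ih rest (c :: cur) acc (by simpa using hlen)]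
        simp

theorem pvJoinSplit (cs : List Char) :
    PySem.Chars.join ['\n'] (PySem.Chars.splitOn cs ['\n']) = cs := by
  unfold PySem.Chars.splitOn
  rw [pvGoJoin (cs.length + 1) cs [] [] (by omega)]
  simp [PySem.Chars.join_singleton]

-- the '//' lookahead test of the scanner is exactly the prefix test of pvCut
theorem pvSlashTest (c : Char) (rest : List Char) :
    (['/', '/'] : List Char).isPrefixOf (c :: rest) = true
      ↔ (c = '/' ∧ rest.head? = some '/') := by
  cases rest with
  | nil => simp [List.isPrefixOf]
  | cons d rest' =>
    simp only [List.isPrefixOf, List.isPrefixOf_nil_left, Bool.and_true, Bool.and_eq_true,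
      beq_iff_eq, List.head?_cons, Option.some.injEq]
    constructor
    · rintro ⟨h1, h2⟩; exact ⟨h1.symm, h2.symm⟩
    · rintro ⟨h1, h2⟩; exact ⟨h1.symm, h2.symm⟩

-- in comment state the scanner drops a newline-free block
theorem pvScanTrueNoNl : ∀ (p : List Char), '\n' ∉ p → pvScan true p = [] := by
  intro p
  induction p with
  | nil => intro _; rw [pvScan]
  | cons c rest ih =>
    intro h
    have hc : c ≠ '\n' := fun he => h (he ▸ List.mem_cons_self ..)
    rw [pvScan, if_neg hc, if_pos rfl]
    exact ih (fun hm => h (List.mem_cons_of_mem _ hm))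

-- in comment state the scanner skips to the next newline
theorem pvScanTrueSeg : ∀ (p t : List Char), '\n' ∉ p →
    pvScan true (p ++ '\n' :: t) = '\n' :: pvScan false t := by
  intro p t
  induction p with
  | nil => intro _; rw [List.nil_append, pvScan, if_pos rfl]
  | cons c rest ih =>
    intro h
    have hc : c ≠ '\n' := fun he => h (he ▸ List.mem_cons_self ..)
    rw [List.cons_append, pvScan, if_neg hc, if_pos rfl]
    exact ih (fun hm => h (List.mem_cons_of_mem _ hm))

-- outside a comment, on a newline-free block, the scanner produces pvClean
theorem pvScanFalseNoNl : ∀ (p : List Char), '\n' ∉ p → pvScan false p = pvClean p := by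
  intro p
  induction p with
  | nil => intro _; rw [pvScan]; rfl
  | cons c rest ih =>
    intro h
    have hc : c ≠ '\n' := fun he => h (he ▸ List.mem_cons_self ..)
    have hrest : '\n' ∉ rest := fun hm => h (List.mem_cons_of_mem _ hm)
    by_cases hsl : c = '/' ∧ rest.head? = some '/'
    · have hpre : (['/', '/'] : List Char).isPrefixOf (c :: rest) = true :=
        (pvSlashTest c rest).mpr hsl
      rw [pvScan, if_neg hc, if_neg (by simp), if_pos hsl,
        pvScanTrueNoNl rest.tail (fun hm => hrest (List.mem_of_mem_tail hm))]
      simp [pvClean, pvCut, hpre]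
    · have hpre : ¬ (['/', '/'] : List Char).isPrefixOf (c :: rest) = true :=
        fun hp => hsl ((pvSlashTest c rest).mp hp)
      have hclean : pvClean (c :: rest) = (pvKeep c).toList ++ pvClean rest := by
        simp only [pvClean, pvCut, if_neg hpre, List.filterMap_cons]
        cases hk : pvKeep c <;> simp [hk]
      rw [pvScan, if_neg hc, if_neg (by simp), if_neg hsl, hclean, ih hrest]
      by_cases h01 : c = '0' ∨ c = '1'
      · rcases h01 with h01 | h01 <;> simp [pvKeep, h01]
      · by_cases hsp : PySem.Chars.isspace c
        · simp [h01, hsp, pvKeep]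
        · have hno : ¬ (c = '0' ∨ c = '1' ∨ PySem.Chars.isspace c) := by tauto
          simp [h01, hsp, pvKeep, hno]

-- outside a comment, the scanner cleans one line and resumes after its newline
theorem pvScanFalseSeg : ∀ (p t : List Char), '\n' ∉ p →
    pvScan false (p ++ '\n' :: t) = pvClean p ++ '\n' :: pvScan false t := by
  intro p t
  induction p with
  | nil => intro _; rw [List.nil_append, pvScan, if_pos rfl]; rfl
  | cons c rest ih =>
    intro h
    have hc : c ≠ '\n' := fun he => h (he ▸ List.mem_cons_self ..)
    have hrest : '\n' ∉ rest := fun hm => h (List.mem_cons_of_mem _ hm)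
    by_cases hsl : c = '/' ∧ (rest ++ '\n' :: t).head? = some '/'
    · -- inside this line a comment begins; the tail of the slash pair is still in this line
      have hne : rest ≠ [] := by
        intro he
        subst he
        simp at hsl
      obtain ⟨d, rest', hrd⟩ := List.exists_cons_of_ne_nil hne
      subst hrd
      have hd : d = '/' := by simpa using hsl.2
      have hpre : (['/', '/'] : List Char).isPrefixOf (c :: d :: rest') = true :=
        (pvSlashTest c (d :: rest')).mpr ⟨hsl.1, by simp [hd]⟩
      rw [List.cons_append, pvScan, if_neg hc, if_neg (by simp), if_pos hsl]
      simp only [List.cons_append, List.tail_cons]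
      rw [pvScanTrueSeg rest' t (fun hm => hrest (List.mem_cons_of_mem _ hm))]
      simp [pvClean, pvCut, hpre]
    · have hsl' : ¬ (c = '/' ∧ rest.head? = some '/') := by
        intro ⟨h1, h2⟩
        apply hsl
        refine ⟨h1, ?_⟩
        cases rest with
        | nil => simp at h2
        | cons d r => simpa using h2
      have hpre : ¬ (['/', '/'] : List Char).isPrefixOf (c :: rest) = true :=
        fun hp => hsl' ((pvSlashTest c rest).mp hp)
      have hclean : pvClean (c :: rest) = (pvKeep c).toList ++ pvClean rest := by
        simp only [pvClean, pvCut, if_neg hpre, List.filterMap_cons]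
        cases hk : pvKeep c <;> simp [hk]
      rw [List.cons_append, pvScan, if_neg hc, if_neg (by simp), if_neg hsl,
        hclean, ih hrest]
      by_cases h01 : c = '0' ∨ c = '1'
      · rcases h01 with h01 | h01 <;> simp [pvKeep, h01]
      · by_cases hsp : PySem.Chars.isspace c
        · simp [h01, hsp, pvKeep]
        · have hno : ¬ (c = '0' ∨ c = '1' ∨ PySem.Chars.isspace c) := by tauto
          simp [h01, hsp, pvKeep, hno]

-- the scanner over joined newline-free parts = the joined cleaned parts
theorem pvScanJoin : ∀ (ps : List (List Char)), (∀ p ∈ ps, '\n' ∉ p) →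
    pvScan false (PySem.Chars.join ['\n'] ps) = PySem.Chars.join ['\n'] (ps.map pvClean) := by
  intro ps
  induction ps with
  | nil =>
    intro _
    rw [PySem.Chars.join_nil, List.map_nil, PySem.Chars.join_nil, pvScan]
  | cons p rest ih =>
    intro h
    cases rest with
    | nil =>
      rw [List.map_cons, List.map_nil, PySem.Chars.join_singleton, PySem.Chars.join_singleton]
      exact pvScanFalseNoNl p (h p (List.mem_cons_self ..))
    | cons q rest' =>
      rw [PySem.Chars.join_cons_cons]
      have hsingle : (['\n'] : List Char) ++ PySem.Chars.join ['\n'] (q :: rest')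
          = '\n' :: PySem.Chars.join ['\n'] (q :: rest') := rfl
      rw [List.append_assoc, hsingle,
        pvScanFalseSeg p _ (h p (List.mem_cons_self ..)),
        ih (fun x hx => h x (List.mem_cons_of_mem _ hx))]
      simp [List.map_cons, PySem.Chars.join_cons_cons]

theorem pvMainEq (s : String) : normalize_binary_py s = normalize_binary_py_alt s := by
  rw [pvAEq, normalize_binary_py_alt]
  congr 1
  rw [← pvScanJoin _ (pvMemSplitOnNoNl s.toList), pvJoinSplit]

-- ===== VERDICT (by name: the statement is the Claim_ definition above) =====
theorem normalize_binary_py_spec : Claim_equal_normalize_binary_py := by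
  intro binary_code _
  unfold Spec_normalize_binary_py
  exact pvMainEq binary_code
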